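-- pv_equiv track=rewrite | github.com/Laaggan/advent_of_code | 2024/6.py | calculate_next_position
-- ===== SOURCE A (Python) =====
-- def calculate_next_direction(current_direction):
--     if current_direction == 'UP':
--         return 'RIGHT'
--     elif current_direction == 'DOWN':
--         return 'LEFT'
--     elif current_direction == 'RIGHT':
--         return 'DOWN'
--     elif current_direction == 'LEFT':
--         return 'UP'
--
-- def calculate_next_position(row, col, current_direction, data):
--     terminated = False
--     new_row, new_col = row, col
--     if current_direction == 'UP':
--         new_row -= 1
--     elif current_direction == 'DOWN':
--         new_row += 1
--     elif current_direction == 'RIGHT':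
--         new_col += 1
--     elif current_direction == 'LEFT':
--         new_col -= 1
--
--     if new_row < 0 or new_row > len(data) - 1 or new_col < 0 or new_col > len(data[0]) - 1:
--         terminated = True
--         return (new_row, new_col, current_direction, terminated)
--
--     if data[new_row][new_col] == "#":
--         current_direction = calculate_next_direction(current_direction)
--         new_row, new_col, current_direction, terminated = calculate_next_position(row, col, current_direction, data)
--
--     return (new_row, new_col, current_direction, terminated)
-- ===== SOURCE B (Python) =====
-- DELTAS = {'UP': (-1, 0), 'DOWN': (1, 0), 'RIGHT': (0, 1), 'LEFT': (0, -1)}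
-- TURN = {'UP': 'RIGHT', 'RIGHT': 'DOWN', 'DOWN': 'LEFT', 'LEFT': 'UP'}
--
-- def calculate_next_position(row, col, current_direction, data):
--     while True:
--         dr, dc = DELTAS.get(current_direction, (0, 0))
--         new_row, new_col = row + dr, col + dc
--         if new_row < 0 or new_row >= len(data) or new_col < 0 or new_col >= len(data[0]):
--             return (new_row, new_col, current_direction, True)
--         if data[new_row][new_col] == '#':
--             current_direction = TURN[current_direction]
--         else:
--             return (new_row, new_col, current_direction, False)
-- ===== Notes on version B (the rewrite author's own statement) =====
-- stated objective: simpler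
-- what changed: The turn-and-retry recursion of A is replaced by an iterative while loop that keeps (row,col) fixed and rotates the direction via small DELTAS/TURN lookup tables until the candidate cell is out of bounds or free.
-- outside the precondition, e.g. on calculate_next_position(0, 1, 'UP', ['..', '#']): A returns (-1, 1, 'UP', True), B returns (-1, 1, 'UP', True)
import Mathlib
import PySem

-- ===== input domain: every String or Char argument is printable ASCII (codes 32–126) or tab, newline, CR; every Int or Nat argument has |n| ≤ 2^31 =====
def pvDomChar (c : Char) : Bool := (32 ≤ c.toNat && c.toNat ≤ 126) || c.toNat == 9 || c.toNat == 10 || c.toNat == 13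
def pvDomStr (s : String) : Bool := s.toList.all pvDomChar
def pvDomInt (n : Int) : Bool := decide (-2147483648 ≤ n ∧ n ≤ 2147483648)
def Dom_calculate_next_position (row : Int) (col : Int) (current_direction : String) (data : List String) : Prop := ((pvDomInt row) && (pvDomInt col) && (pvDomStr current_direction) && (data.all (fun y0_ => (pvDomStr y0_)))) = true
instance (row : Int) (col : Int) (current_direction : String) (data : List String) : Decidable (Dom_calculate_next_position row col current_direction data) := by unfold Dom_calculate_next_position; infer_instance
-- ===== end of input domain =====

-- B replaces A's turn-and-retry recursion with an iterative loop over the direction (with DELTAS/TURN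
-- lookup tables), keeping (row, col) fixed: a simpler decomposition of the same one-step computation.

-- ===== PORT A =====
-- helper 'calculate_next_direction' of A; Python returns None on a direction outside the four
-- (that branch is unreachable under Pre_, ported as "")
def calculate_next_direction (current_direction : String) : String :=
  if current_direction = "UP" then "RIGHT"
  else if current_direction = "DOWN" then "LEFT"
  else if current_direction = "RIGHT" then "DOWN"
  else if current_direction = "LEFT" then "UP"
  else ""

-- A's recursion rotates the direction; it makes at most 4 calls unless every neighbour is a wall
-- (then Python hits RecursionError — excluded by Pre_), so fuel 4 only makes the same computation total.
def calculate_next_position_go (fuel : Nat) (row : Int) (col : Int) (current_direction : String) (data : List String) : Int × Int × String × Bool :=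
  match fuel with
  | 0 => (row, col, current_direction, false) -- fuel exhausted: unreachable under Pre_
  | f + 1 =>
    let p : Int × Int :=
      if current_direction = "UP" then (row - 1, col)
      else if current_direction = "DOWN" then (row + 1, col)
      else if current_direction = "RIGHT" then (row, col + 1)
      else if current_direction = "LEFT" then (row, col - 1)
      else (row, col)
    if p.1 < 0 ∨ p.1 > (data.length : Int) - 1 ∨ p.2 < 0 ∨
        p.2 > PySem.Str.len ((PySem.List.pyGet? data 0).getD "") - 1 then
      (p.1, p.2, current_direction, true)
    else if (PySem.List.pyGet? data p.1).bind (fun s => PySem.Str.pyGet? s p.2) = some '#' then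
      calculate_next_position_go f row col (calculate_next_direction current_direction) data
    else
      (p.1, p.2, current_direction, false)

def calculate_next_position (row : Int) (col : Int) (current_direction : String) (data : List String) : Int × Int × String × Bool :=
  calculate_next_position_go 4 row col current_direction data

-- ===== PORT B =====
def pvDeltas : PySem.Dict String (Int × Int) :=
  PySem.Dict.ofList [("UP", (-1, 0)), ("DOWN", (1, 0)), ("RIGHT", (0, 1)), ("LEFT", (0, -1))]

def pvTurn : PySem.Dict String String :=
  PySem.Dict.ofList [("UP", "RIGHT"), ("RIGHT", "DOWN"), ("DOWN", "LEFT"), ("LEFT", "UP")]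

-- B's 'while True' loop turns at most 3 times before resolving on any input admitted by Pre_,
-- so fuel 4 only makes the same loop total. TURN[d] raises KeyError on an invalid direction in
-- Python (unreachable under Pre_); ported with default d.
def calculate_next_position_alt_go (fuel : Nat) (row : Int) (col : Int) (current_direction : String) (data : List String) : Int × Int × String × Bool :=
  match fuel with
  | 0 => (row, col, current_direction, false) -- fuel exhausted: unreachable under Pre_
  | f + 1 =>
    let dd := pvDeltas.getD current_direction (0, 0)
    let new_row := row + dd.1
    let new_col := col + dd.2
    if new_row < 0 ∨ (data.length : Int) ≤ new_row ∨ new_col < 0 ∨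
        PySem.Str.len ((PySem.List.pyGet? data 0).getD "") ≤ new_col then
      (new_row, new_col, current_direction, true)
    else if (PySem.List.pyGet? data new_row).bind (fun s => PySem.Str.pyGet? s new_col) = some '#' then
      calculate_next_position_alt_go f row col (pvTurn.getD current_direction current_direction) data
    else
      (new_row, new_col, current_direction, false)

def calculate_next_position_alt (row : Int) (col : Int) (current_direction : String) (data : List String) : Int × Int × String × Bool :=
  calculate_next_position_alt_go 4 row col current_direction data

-- ===== PRECONDITION & SPEC =====
-- pvInB: A's bounds test (column bounded by the FIRST row's length, as in the Python)
def pvInB (data : List String) (r : Int) (c : Int) : Bool :=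
  decide (0 ≤ r) && decide (r < (data.length : Int)) && decide (0 ≤ c) &&
  decide (c < PySem.Str.len ((PySem.List.pyGet? data 0).getD ""))

-- pvRowSafe: if (r,c) passes A's bounds test, column c really exists in row r (else Python IndexError)
def pvRowSafe (data : List String) (r : Int) (c : Int) : Bool :=
  !(pvInB data r c) || decide (c < PySem.Str.len (data.getD r.toNat ""))

def pvBlocked (data : List String) (r : Int) (c : Int) : Bool :=
  pvInB data r c && ((PySem.List.pyGet? data r).bind (fun s => PySem.Str.pyGet? s c) == some '#')

def pvValidDir (d : String) : Bool :=
  d == "UP" || d == "DOWN" || d == "RIGHT" || d == "LEFT"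

-- Pre_ excludes: (i) inputs where one of the four neighbour cells passes A's bounds test but its own
-- row is too short (Python IndexError on the cells the walk visits; over-approximated to all four
-- neighbours, so a few inputs on which A returns without visiting the short row are also excluded —
-- see claim cites); (ii) all four neighbours being walls (A recurses forever: RecursionError);
-- (iii) a direction outside the four while standing on a '#' cell (A recurses with None forever:
-- RecursionError) or on a cell whose row is too short (IndexError).
def Pre_calculate_next_position (row : Int) (col : Int) (current_direction : String) (data : List String) : Prop :=
  (if pvValidDir current_direction then
    pvRowSafe data (row - 1) col && pvRowSafe data (row + 1) col &&
    pvRowSafe data row (col + 1) && pvRowSafe data row (col - 1) &&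
    !(pvBlocked data (row - 1) col && pvBlocked data (row + 1) col &&
      pvBlocked data row (col + 1) && pvBlocked data row (col - 1))
  else
    pvRowSafe data row col && !(pvBlocked data row col)) = true

instance (row : Int) (col : Int) (current_direction : String) (data : List String) : Decidable (Pre_calculate_next_position row col current_direction data) := by unfold Pre_calculate_next_position; infer_instance

def pvWitness_calculate_next_position : Int × Int × String × List String := (0, 0, "RIGHT", ["..", ".."])

def Spec_calculate_next_position (row : Int) (col : Int) (current_direction : String) (data : List String) (out : Int × Int × String × Bool) : Prop := out = calculate_next_position_alt row col current_direction data
instance (row : Int) (col : Int) (current_direction : String) (data : List String) (out : Int × Int × String × Bool) : Decidable (Spec_calculate_next_position row col current_direction data out) := by unfold Spec_calculate_next_position; infer_instance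

-- ===== CLAIM (what is proved, stated in full; the proofs are below) =====
def Claim_equal_calculate_next_position : Prop := ∀ (row : Int) (col : Int) (current_direction : String) (data : List String), Dom_calculate_next_position row col current_direction data → Pre_calculate_next_position row col current_direction data → Spec_calculate_next_position row col current_direction data (calculate_next_position row col current_direction data)

-- ===== LEMMAS AND PROOFS =====

-- On the four valid directions both go-functions unfold to the same step and rotate the
-- direction identically, so they agree at EVERY fuel (the fuel-0 defaults coincide too).
lemma pv_go_eq (f : Nat) (row col : Int) (d : String) (data : List String)
    (hd : pvValidDir d = true) :
    calculate_next_position_go f row col d data = calculate_next_position_alt_go f row col d data := by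
  induction f generalizing d with
  | zero => rfl
  | succ f ih =>
    have hd' : d = "UP" ∨ d = "DOWN" ∨ d = "RIGHT" ∨ d = "LEFT" := by
      simp [pvValidDir] at hd; tauto
    have hup : pvDeltas.getD "UP" (0, 0) = (-1, 0) := by decide
    have hdn : pvDeltas.getD "DOWN" (0, 0) = (1, 0) := by decide
    have hrt : pvDeltas.getD "RIGHT" (0, 0) = (0, 1) := by decide
    have hlf : pvDeltas.getD "LEFT" (0, 0) = (0, -1) := by decide
    have tup : pvTurn.getD "UP" "UP" = "RIGHT" := by decide
    have tdn : pvTurn.getD "DOWN" "DOWN" = "LEFT" := by decide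
    have trt : pvTurn.getD "RIGHT" "RIGHT" = "DOWN" := by decide
    have tlf : pvTurn.getD "LEFT" "LEFT" = "UP" := by decide
    rcases hd' with rfl | rfl | rfl | rfl <;>
      simp only [calculate_next_position_go, calculate_next_position_alt_go,
        calculate_next_direction, hup, hdn, hrt, hlf, tup, tdn, trt, tlf,
        String.reduceEq, if_true, if_false, Int.sub_eq_add_neg, add_zero] <;>
      split_ifs with h1 h2 h3 <;>
        first
          | rfl
          | (exfalso; omega)
          | exact ih _ (by decide)

-- ===== VERDICT (by name: the statement is the Claim_ definition above) =====
theorem calculate_next_position_spec : Claim_equal_calculate_next_position := by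
  intro row col d data _ hpre
  unfold Spec_calculate_next_position
  by_cases hv : pvValidDir d = true
  · unfold calculate_next_position calculate_next_position_alt
    exact pv_go_eq 4 row col d data hv
  · -- invalid direction: no movement; Pre_ guarantees the current cell is not '#'
    have hne : d ≠ "UP" ∧ d ≠ "DOWN" ∧ d ≠ "RIGHT" ∧ d ≠ "LEFT" := by
      simp [pvValidDir] at hv; tauto
    have hk : pvDeltas.keys = ["UP", "DOWN", "RIGHT", "LEFT"] := by decide
    have hc : pvDeltas.contains d = false := by
      rw [PySem.Dict.contains_eq_decide_mem_keys, hk]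
      simp [hne.1, hne.2.1, hne.2.2.1, hne.2.2.2]
    have hdel : pvDeltas.getD d (0, 0) = (0, 0) :=
      PySem.Dict.getD_of_not_contains _ _ hc
    unfold Pre_calculate_next_position at hpre
    rw [if_neg hv] at hpre
    simp only [Bool.and_eq_true, Bool.not_eq_true'] at hpre
    obtain ⟨hsafe, hblk⟩ := hpre
    unfold calculate_next_position calculate_next_position_alt
    simp only [calculate_next_position_go, calculate_next_position_alt_go,
      if_neg hne.1, if_neg hne.2.1, if_neg hne.2.2.1, if_neg hne.2.2.2, hdel, add_zero]
    by_cases hoob : row < 0 ∨ row > (data.length : Int) - 1 ∨ col < 0 ∨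
        col > PySem.Str.len ((PySem.List.pyGet? data 0).getD "") - 1
    · have hoobB : row < 0 ∨ (data.length : Int) ≤ row ∨ col < 0 ∨
          PySem.Str.len ((PySem.List.pyGet? data 0).getD "") ≤ col := by omega
      rw [if_pos hoob, if_pos hoobB]
    · have hoobB : ¬(row < 0 ∨ (data.length : Int) ≤ row ∨ col < 0 ∨
          PySem.Str.len ((PySem.List.pyGet? data 0).getD "") ≤ col) := by omega
      have hinb : pvInB data row col = true := by
        unfold pvInB
        simp only [Bool.and_eq_true, decide_eq_true_eq]
        omega
      have hcell : ¬((PySem.List.pyGet? data row).bind (fun s => PySem.Str.pyGet? s col) = some '#') := by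
        unfold pvBlocked at hblk
        rw [hinb] at hblk
        simp only [Bool.true_and, beq_eq_false_iff_ne, ne_eq] at hblk
        exact hblk
      rw [if_neg hoob, if_neg hoobB, if_neg hcell, if_neg hcell]
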